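-- pv_equiv track=rewrite | github.com/zhangshuibai/Path-Planning | examples/protein/utils.py | create_batched_sequence_dataset
-- ===== SOURCE A (Python) =====
-- import typing as T
--
-- def create_batched_sequence_dataset(
--     sequences: T.List[T.Tuple[str, str]],
--     max_tokens_per_batch: int = 1024
-- ) -> T.Generator[T.Tuple[T.List[str], T.List[str]], None, None]:
--     """Create batched sequences for efficient processing."""
--     batch_headers, batch_sequences, num_tokens = [], [], 0
--     for header, seq in sequences:
--         if (len(seq) + num_tokens > max_tokens_per_batch) and num_tokens > 0:
--             yield batch_headers, batch_sequences
--             batch_headers, batch_sequences, num_tokens = [], [], 0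
--         batch_headers.append(header)
--         batch_sequences.append(seq)
--         num_tokens += len(seq)
--     if batch_headers:
--         yield batch_headers, batch_sequences
-- ===== SOURCE B (Python) =====
-- def create_batched_sequence_dataset(sequences, max_tokens_per_batch=1024):
--     """Two-pass version: first compute batch sizes, then split and unzip."""
--     sizes = []
--     count = 0
--     running = 0
--     for _, seq in sequences:
--         if len(seq) + running > max_tokens_per_batch and running > 0:
--             sizes.append(count)
--             count, running = 0, 0
--         count += 1
--         running += len(seq)
--     if count:
--         sizes.append(count)
--     rest = sequences
--     for k in sizes:
--         chunk, rest = rest[:k], rest[k:]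
--         yield [h for h, _ in chunk], [s for _, s in chunk]
-- ===== Notes on version B (the rewrite author's own statement) =====
-- stated objective: alternative
-- what changed: B separates boundary computation from emission: one pass records batch sizes under the same reset rule, a second pass splits the sequence list by those sizes and unzips each chunk, instead of A's single pass growing header/sequence accumulators.
import Mathlib
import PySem

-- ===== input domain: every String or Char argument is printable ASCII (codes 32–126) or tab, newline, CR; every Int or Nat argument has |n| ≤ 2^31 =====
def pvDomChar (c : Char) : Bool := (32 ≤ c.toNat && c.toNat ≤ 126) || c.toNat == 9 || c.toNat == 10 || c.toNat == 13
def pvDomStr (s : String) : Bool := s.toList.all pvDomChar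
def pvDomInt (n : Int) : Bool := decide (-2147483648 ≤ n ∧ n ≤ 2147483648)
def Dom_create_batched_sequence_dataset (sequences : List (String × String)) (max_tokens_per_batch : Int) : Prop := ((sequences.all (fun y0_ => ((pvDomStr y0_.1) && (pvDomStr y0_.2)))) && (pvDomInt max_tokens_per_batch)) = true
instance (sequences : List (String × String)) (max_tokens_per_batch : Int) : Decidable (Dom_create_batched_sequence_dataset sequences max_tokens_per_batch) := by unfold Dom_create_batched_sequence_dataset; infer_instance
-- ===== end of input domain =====

-- B separates boundary computation from emission: one pass records batch sizes under the
-- same reset rule, a second pass splits the list by those sizes and unzips each chunk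
-- (alternative decomposition, same O(n) cost).

-- ===== PORT A =====
-- single loop over sequences with accumulators (batch_headers, batch_sequences, num_tokens);
-- the list of yielded pairs is collected in order
def pvAGo (m : Int) : List (String × String) → List String → List String → Int → List (List String × List String)
  | [], bh, bs, _ => if bh ≠ [] then [(bh, bs)] else []
  | (header, seq) :: rest, bh, bs, n =>
    if PySem.Str.len seq + n > m ∧ n > 0 then
      -- yield; reset accumulators to [],[],0; then append header/seq and add len
      (bh, bs) :: pvAGo m rest ([] ++ [header]) ([] ++ [seq]) (0 + PySem.Str.len seq)
    else
      pvAGo m rest (bh ++ [header]) (bs ++ [seq]) (n + PySem.Str.len seq)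

def create_batched_sequence_dataset (sequences : List (String × String)) (max_tokens_per_batch : Int) : List (List String × List String) :=
  pvAGo max_tokens_per_batch sequences [] [] 0

-- ===== PORT B =====
-- pass 1: batch sizes under the same reset rule
def pvSizes (m : Int) : List (String × String) → Int → Int → List Int
  | [], count, _ => if count ≠ 0 then [count] else []
  | (_, seq) :: rest, count, running =>
    if PySem.Str.len seq + running > m ∧ running > 0 then
      count :: pvSizes m rest (0 + 1) (0 + PySem.Str.len seq)
    else
      pvSizes m rest (count + 1) (running + PySem.Str.len seq)

-- pass 2: split the sequence list by the sizes and unzip each chunk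
def pvEmit : List Int → List (String × String) → List (List String × List String)
  | [], _ => []
  | k :: ks, rest =>
    let chunk := PySem.List.slice rest none (some k)     -- rest[:k]
    let rest' := PySem.List.slice rest (some k) none     -- rest[k:]
    (chunk.map Prod.fst, chunk.map Prod.snd) :: pvEmit ks rest'

def create_batched_sequence_dataset_alt (sequences : List (String × String)) (max_tokens_per_batch : Int) : List (List String × List String) :=
  pvEmit (pvSizes max_tokens_per_batch sequences 0 0) sequences

-- ===== PRECONDITION & SPEC =====
def Spec_create_batched_sequence_dataset (sequences : List (String × String)) (max_tokens_per_batch : Int) (out : List (List String × List String)) : Prop := out = create_batched_sequence_dataset_alt sequences max_tokens_per_batch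
instance (sequences : List (String × String)) (max_tokens_per_batch : Int) (out : List (List String × List String)) : Decidable (Spec_create_batched_sequence_dataset sequences max_tokens_per_batch out) := by unfold Spec_create_batched_sequence_dataset; infer_instance

-- ===== CLAIM (what is proved, stated in full; the proofs are below) =====
def Claim_equal_create_batched_sequence_dataset : Prop := ∀ (sequences : List (String × String)) (max_tokens_per_batch : Int), Dom_create_batched_sequence_dataset sequences max_tokens_per_batch → Spec_create_batched_sequence_dataset sequences max_tokens_per_batch (create_batched_sequence_dataset sequences max_tokens_per_batch)

-- ===== LEMMAS AND PROOFS =====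

-- loop invariant: A's accumulators are the projections of the pending chunk, whose length
-- is B's count and which prefixes the part of the list B has not yet emitted
-- emitting one full-length chunk / one chunk off the front of the remaining list
theorem pvEmit_len (l : List (String × String)) :
    pvEmit [(l.length : Int)] l = [(l.map Prod.fst, l.map Prod.snd)] := by
  simp [pvEmit, PySem.List.slice_to_natCast]

theorem pvEmit_cons (ks : List Int) (chunk rest : List (String × String)) :
    pvEmit ((chunk.length : Int) :: ks) (chunk ++ rest)
      = (chunk.map Prod.fst, chunk.map Prod.snd) :: pvEmit ks rest := by
  simp [pvEmit, PySem.List.slice_to_natCast, PySem.List.slice_from_natCast,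
    List.take_left', List.drop_left']

-- loop invariant: A's accumulators are the projections of the pending chunk, whose length
-- is B's count and which prefixes the part of the list B has not yet emitted
theorem pvMain (m : Int) : ∀ (rest chunk : List (String × String)) (n : Int),
    pvAGo m rest (chunk.map Prod.fst) (chunk.map Prod.snd) n
      = pvEmit (pvSizes m rest (chunk.length : Int) n) (chunk ++ rest) := by
  intro rest
  induction rest with
  | nil =>
    intro chunk n
    by_cases h : chunk = []
    · subst h; simp [pvAGo, pvSizes, pvEmit]
    · have hbh : chunk.map Prod.fst ≠ [] := by simpa using h
      have hct : (chunk.length : Int) ≠ 0 := by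
        simpa [List.length_eq_zero_iff] using h
      simp only [pvAGo, pvSizes]
      rw [if_pos hbh, if_pos hct, List.append_nil, pvEmit_len]
  | cons hd rest ih =>
    intro chunk n
    obtain ⟨header, seq⟩ := hd
    simp only [pvAGo, pvSizes]
    by_cases hc : PySem.Str.len seq + n > m ∧ n > 0
    · rw [if_pos hc, if_pos hc]
      have h1 : ([] ++ [header] : List String) = ([(header, seq)].map Prod.fst) := by simp
      have h2 : ([] ++ [seq] : List String) = ([(header, seq)].map Prod.snd) := by simp
      rw [h1, h2, ih [(header, seq)] (0 + PySem.Str.len seq)]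
      have h4 : chunk ++ (header, seq) :: rest = chunk ++ ([(header, seq)] ++ rest) := by simp
      rw [h4, pvEmit_cons]
      norm_num
    · rw [if_neg hc, if_neg hc]
      have h1 : chunk.map Prod.fst ++ [header] = ((chunk ++ [(header, seq)]).map Prod.fst) := by simp
      have h2 : chunk.map Prod.snd ++ [seq] = ((chunk ++ [(header, seq)]).map Prod.snd) := by simp
      rw [h1, h2, ih (chunk ++ [(header, seq)]) (n + PySem.Str.len seq)]
      have h3 : ((chunk ++ [(header, seq)]).length : Int) = (chunk.length : Int) + 1 := by simp
      rw [h3, List.append_assoc]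
      norm_num

-- ===== VERDICT (by name: the statement is the Claim_ definition above) =====
theorem create_batched_sequence_dataset_spec : Claim_equal_create_batched_sequence_dataset := by
  intro sequences m _
  unfold Spec_create_batched_sequence_dataset create_batched_sequence_dataset create_batched_sequence_dataset_alt
  have := pvMain m sequences [] 0
  simpa using this
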